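-- pv_equiv track=rewrite | github.com/Srinjana/CC_practice | MISC/COGNIZANT ELEVATE/familytree.py | identify_siblings
-- ===== SOURCE A (Python) =====
-- def identify_siblings(tree_array, x):
--
--     tree_len = len(tree_array)
--     index = tree_array.index(x)
--     level = 0
--     start_index = level
--     number_of_nodes = 0
--
--     while start_index < tree_len:
--     	end_index = pow(2, level) + start_index
--
--     	if x in tree_array[start_index:end_index]:
--     		break
--
--     	level += 1
--     	start_index = (2 * start_index) + 1
--     final_array = tree_array[start_index:end_index]
--     final_array.remove(x)
--
--     return final_array if final_array else [-1]
-- ===== SOURCE B (Python) =====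
-- def identify_siblings(tree_array, x):
--     index = tree_array.index(x)
--     level = (index + 1).bit_length() - 1
--     sib = tree_array[2 ** level - 1 : 2 ** (level + 1) - 1]
--     sib.remove(x)
--     return sib if sib else [-1]
-- ===== Notes on version B (the rewrite author's own statement) =====
-- stated objective: simpler
-- what changed: Replaces A's level-by-level while loop that scans slices for x with a closed-form computation of the level from the first index via bit_length ((index+1).bit_length()-1 = floor(log2(index+1))), then takes the one sibling slice directly.
import Mathlib
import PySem

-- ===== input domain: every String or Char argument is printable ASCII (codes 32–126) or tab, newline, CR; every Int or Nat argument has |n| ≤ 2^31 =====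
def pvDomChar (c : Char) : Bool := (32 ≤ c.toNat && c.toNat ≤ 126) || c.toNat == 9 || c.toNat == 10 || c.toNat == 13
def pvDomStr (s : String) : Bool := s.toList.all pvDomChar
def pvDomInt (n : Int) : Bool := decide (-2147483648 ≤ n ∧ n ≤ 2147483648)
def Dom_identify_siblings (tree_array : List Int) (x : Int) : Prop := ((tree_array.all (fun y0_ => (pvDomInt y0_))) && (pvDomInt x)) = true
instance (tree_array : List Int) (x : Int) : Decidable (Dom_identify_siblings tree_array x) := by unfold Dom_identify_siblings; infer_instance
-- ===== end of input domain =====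

-- B replaces A's level-scanning while loop with a closed-form bit_length computation of the level (simpler).


-- ===== PORT A =====
-- A's while loop; 'level' is a nonnegative Python int starting at 0, ported as Nat.
-- fuel = tree_array.length + 1 always suffices: start_index strictly increases each step.
def identifySiblingsLoopA (tree_array : List Int) (x : Int) :
    Nat → Nat → Int → Int → Int × Int
  | 0, _, start_index, end_index => (start_index, end_index)
  | fuel + 1, level, start_index, end_index =>
      if start_index < (tree_array.length : Int) then
        let e : Int := 2 ^ level + start_index
        if x ∈ PySem.List.slice tree_array (some start_index) (some e) then
          (start_index, e)
        else
          identifySiblingsLoopA tree_array x fuel (level + 1) (2 * start_index + 1) e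
      else (start_index, end_index)

def identify_siblings (tree_array : List Int) (x : Int) : List Int :=
  match PySem.List.index? tree_array x with
  | none => []  -- ValueError from tree_array.index(x); excluded by Pre_
  | some _ =>
      let p := identifySiblingsLoopA tree_array x (tree_array.length + 1) 0 0 0
      let final_array := PySem.List.slice tree_array (some p.1) (some p.2)
      match PySem.List.remove? final_array x with
      | none => []  -- ValueError from .remove; unreachable under Pre_
      | some fa => if fa.isEmpty then [-1] else fa

-- ===== PORT B =====
-- (index+1).bit_length() - 1 for index ≥ 0 is Nat.log2 (index+1)
def identify_siblings_alt (tree_array : List Int) (x : Int) : List Int :=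
  match PySem.List.index? tree_array x with
  | none => []  -- ValueError from tree_array.index(x); excluded by Pre_
  | some i =>
      let level : Nat := Nat.log2 (i + 1)
      let sib := PySem.List.slice tree_array
        (some ((2 : Int) ^ level - 1)) (some ((2 : Int) ^ (level + 1) - 1))
      match PySem.List.remove? sib x with
      | none => []  -- ValueError from .remove; unreachable under Pre_
      | some s => if s.isEmpty then [-1] else s

-- ===== PRECONDITION & SPEC =====
-- Pre_: x must occur in tree_array; otherwise Python's list.index raises ValueError (in A and in B).
def Pre_identify_siblings (tree_array : List Int) (x : Int) : Prop := x ∈ tree_array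
instance (tree_array : List Int) (x : Int) : Decidable (Pre_identify_siblings tree_array x) := by
  unfold Pre_identify_siblings; infer_instance

def pvWitness_identify_siblings : List Int × Int := ([1, 2, 3, 4, 5, 6, 7], 5)

def Spec_identify_siblings (tree_array : List Int) (x : Int) (out : List Int) : Prop := out = identify_siblings_alt tree_array x
instance (tree_array : List Int) (x : Int) (out : List Int) : Decidable (Spec_identify_siblings tree_array x out) := by unfold Spec_identify_siblings; infer_instance

-- ===== CLAIM (what is proved, stated in full; the proofs are below) =====
def Claim_equal_identify_siblings : Prop := ∀ (tree_array : List Int) (x : Int), Dom_identify_siblings tree_array x → Pre_identify_siblings tree_array x → Spec_identify_siblings tree_array x (identify_siblings tree_array x)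

-- ===== LEMMAS AND PROOFS =====

-- membership in a drop/take window, phrased by absolute index
theorem pv_mem_drop_take {xs : List Int} {x : Int} {s n : Nat} :
    x ∈ (xs.drop s).take n ↔ ∃ j, s ≤ j ∧ j < s + n ∧ ∃ h : j < xs.length, xs[j] = x := by
  constructor
  · intro hx
    rw [List.mem_iff_getElem] at hx
    obtain ⟨k, hk, hval⟩ := hx
    have hk' : k < n ∧ s + k < xs.length := by
      simp [List.length_take, List.length_drop] at hk; omega
    refine ⟨s + k, by omega, by omega, hk'.2, ?_⟩
    rw [List.getElem_take, List.getElem_drop] at hval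
    exact hval
  · rintro ⟨j, hsj, hjn, hj, hval⟩
    rw [List.mem_iff_getElem]
    refine ⟨j - s, ?_, ?_⟩
    · simp [List.length_take, List.length_drop]; omega
    · rw [List.getElem_take, List.getElem_drop]
      have : s + (j - s) = j := by omega
      simp [this, hval]

-- loop characterisation: from start = 2^l - 1 with l ≤ L, the loop returns level L's window
theorem pv_loopA_spec (tree_array : List Int) (x : Int) (i : Nat)
    (hi : i < tree_array.length) (hix : tree_array[i] = x)
    (hfirst : ∀ j (hj : j < i), tree_array[j] ≠ x) :
    ∀ fuel l, l ≤ Nat.log2 (i + 1) → Nat.log2 (i + 1) - l < fuel → ∀ e0,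
      identifySiblingsLoopA tree_array x fuel l ((2 : Int) ^ l - 1) e0 =
        ((2 : Int) ^ Nat.log2 (i + 1) - 1, (2 : Int) ^ (Nat.log2 (i + 1) + 1) - 1) := by
  set L := Nat.log2 (i + 1) with hL
  have hpowL : 2 ^ L ≤ i + 1 := (Nat.le_log2 (by omega)).mp (le_refl L)
  have hiL : i + 1 < 2 ^ (L + 1) := (Nat.log2_lt (by omega)).mp (by omega)
  intro fuel
  induction fuel with
  | zero => intro l _ h; omega
  | succ fuel ih =>
    intro l hlL hfuel e0
    have hpl : 2 ^ l ≤ i + 1 := le_trans (Nat.pow_le_pow_right (by omega) hlL) hpowL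
    have hcast : ((2 : Int) ^ l) = (((2 ^ l : Nat) : Int)) := by push_cast; ring
    have hstart_lt : (2 : Int) ^ l - 1 < (tree_array.length : Int) := by
      rw [hcast]; have : (2 : Nat) ^ l ≤ i + 1 := hpl
      have := hi; omega
    rw [identifySiblingsLoopA, if_pos hstart_lt]
    have hslice : PySem.List.slice tree_array (some ((2:Int) ^ l - 1))
        (some ((2:Int) ^ l + ((2:Int) ^ l - 1))) = (tree_array.drop (2 ^ l - 1)).take (2 ^ l) := by
      have h1 : ((2:Int) ^ l - 1) = (((2 ^ l - 1 : Nat) : Int)) := by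
        push_cast [Nat.one_le_two_pow]; ring
      have h2 : ((2:Int) ^ l + ((2:Int) ^ l - 1)) = (((2 ^ l - 1 : Nat) : Int) + ((2 ^ l : Nat) : Int)) := by
        push_cast [Nat.one_le_two_pow]; ring
      rw [h2, h1, PySem.List.slice_natCast_add]
    by_cases hmem : x ∈ PySem.List.slice tree_array (some ((2:Int) ^ l - 1)) (some ((2:Int) ^ l + ((2:Int) ^ l - 1)))
    · -- break: this forces l = L
      have : ∃ j, 2 ^ l - 1 ≤ j ∧ j < 2 ^ l - 1 + 2 ^ l ∧ ∃ h : j < tree_array.length, tree_array[j] = x := by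
        rw [hslice, pv_mem_drop_take] at hmem; exact hmem
      obtain ⟨j, hj1, hj2, hjlen, hjx⟩ := this
      have hij : i ≤ j := by
        by_contra hc
        exact hfirst j (by omega) hjx
      have hlt : i + 1 < 2 ^ (l + 1) := by
        have : 2 ^ (l + 1) = 2 ^ l + 2 ^ l := by ring
        omega
      have hlL' : L ≤ l := by
        have := (Nat.log2_lt (n := i + 1) (by omega)).mpr hlt
        omega
      have hle : l = L := le_antisymm hlL hlL'
      subst hle
      rw [if_pos hmem]
      have hsnd : (2 : Int) ^ L + ((2 : Int) ^ L - 1) = (2 : Int) ^ (L + 1) - 1 := by ring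
      rw [hsnd]
    · -- no break: x not in window, so i ≥ 2^(l+1) - 1, hence l < L
      have hnot : ¬ (i < 2 ^ l - 1 + 2 ^ l) := by
        intro hc
        apply hmem
        rw [hslice, pv_mem_drop_take]
        exact ⟨i, by omega, hc, hi, hix⟩
      have hlL' : l < L := by
        rcases Nat.lt_or_ge l L with h | h
        · exact h
        · exfalso
          have : l = L := le_antisymm hlL h
          subst this
          have : 2 ^ (L + 1) = 2 ^ L + 2 ^ L := by ring
          omega
      rw [if_neg hmem]
      have harg : 2 * ((2 : Int) ^ l - 1) + 1 = (2 : Int) ^ (l + 1) - 1 := by ring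
      rw [harg]
      exact ih (l + 1) (by omega) (by omega) _

theorem identify_siblings_eq (tree_array : List Int) (x : Int)
    (hpre : x ∈ tree_array) :
    identify_siblings tree_array x = identify_siblings_alt tree_array x := by
  obtain ⟨i, hidx⟩ := Option.isSome_iff_exists.mp
    ((PySem.List.index?_isSome_iff tree_array x).mpr hpre)
  obtain ⟨hi, hix, hfirst⟩ := PySem.List.getElem_of_index?_eq_some hidx
  have hL2 : 2 ^ Nat.log2 (i + 1) ≤ i + 1 := (Nat.le_log2 (by omega)).mp (le_refl _)
  have hlog_le : Nat.log2 (i + 1) - 0 < tree_array.length + 1 := by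
    have h1 : Nat.log2 (i + 1) < 2 ^ Nat.log2 (i + 1) :=
      Nat.lt_two_pow_self (n := Nat.log2 (i + 1))
    omega
  have hloop := pv_loopA_spec tree_array x i hi hix hfirst
    (tree_array.length + 1) 0 (Nat.zero_le _) hlog_le 0
  have hloop' : identifySiblingsLoopA tree_array x (tree_array.length + 1) 0 0 0 =
      ((2 : Int) ^ Nat.log2 (i + 1) - 1, (2 : Int) ^ (Nat.log2 (i + 1) + 1) - 1) := by
    have h0 : ((2 : Int) ^ (0 : Nat) - 1) = 0 := by norm_num
    rw [← h0]; exact hloop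
  unfold identify_siblings identify_siblings_alt
  rw [hidx]
  simp only [hloop']

-- ===== VERDICT (by name: the statement is the Claim_ definition above) =====
theorem identify_siblings_spec : Claim_equal_identify_siblings := by
  intro tree_array x _ hpre
  unfold Spec_identify_siblings
  exact identify_siblings_eq tree_array x hpre
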